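-- pv_equiv track=rewrite | github.com/amirshams8/JarvisMerged | scripts/patch_applier.py | extract_diff
-- ===== SOURCE A (Python) =====
-- def extract_diff(text: str) -> str:
--     lines = []
--     in_diff = False
--     for line in text.splitlines():
--         if line.startswith("diff --git"):
--             in_diff = True
--         if in_diff:
--             lines.append(line)
--     return "\n".join(lines).strip()
-- ===== SOURCE B (Python) =====
-- def extract_diff(text: str) -> str:
--     # Normalize line endings once, then search the raw text for a line-anchored
--     # "diff --git" header: at position 0 or right after a '\n'.
--     norm = "\n".join(text.splitlines())
--     if norm.startswith("diff --git"):
--         return norm.strip()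
--     j = norm.find("\ndiff --git")
--     if j == -1:
--         return ""
--     return norm[j + 1:].strip()
-- ===== Notes on version B (the rewrite author's own statement) =====
-- stated objective: alternative
-- what changed: Replaces the per-line flag-and-accumulate loop with a raw-text strategy: normalize line endings once by joining the split lines with a newline, then locate the header with a single substring search (startswith at position 0, else one find of a newline-prefixed needle) and take one slice of the normalized text.
import Mathlib
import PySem

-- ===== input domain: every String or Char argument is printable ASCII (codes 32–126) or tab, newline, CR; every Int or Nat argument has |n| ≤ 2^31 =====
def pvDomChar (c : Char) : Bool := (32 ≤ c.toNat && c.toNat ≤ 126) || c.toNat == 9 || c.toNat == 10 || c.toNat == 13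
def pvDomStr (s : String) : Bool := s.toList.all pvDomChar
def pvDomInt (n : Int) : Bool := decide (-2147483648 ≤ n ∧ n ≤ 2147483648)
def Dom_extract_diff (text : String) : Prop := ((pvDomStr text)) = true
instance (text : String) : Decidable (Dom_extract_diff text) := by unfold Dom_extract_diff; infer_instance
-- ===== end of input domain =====

-- B replaces A's per-line flag-and-accumulate loop with: normalize line endings once via "\n".join(splitlines),
-- then one raw-text search for a line-anchored "diff --git" header and a single slice (alternative decomposition).


-- ===== PORT A =====
-- loop body of A: update in_diff, then append the line if in_diff
def stepA (st : List String × Bool) (line : String) : List String × Bool :=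
  let inDiff := if PySem.Str.startswith line "diff --git" then true else st.2
  (if inDiff then st.1 ++ [line] else st.1, inDiff)

def extract_diff (text : String) : String :=
  let r := (PySem.Str.splitlines text).foldl stepA ([], false)
  PySem.Str.strip (PySem.Str.join "\n" r.1)

-- ===== PORT B =====
-- Source B: normalize once, then search the raw normalized text for a line-anchored header
def extract_diff_alt (text : String) : String :=
  let norm := PySem.Str.join "\n" (PySem.Str.splitlines text)
  if PySem.Str.startswith norm "diff --git" then PySem.Str.strip norm
  else
    let j := PySem.Str.find norm "\ndiff --git"
    if j = -1 then ""
    else PySem.Str.strip (PySem.Str.slice norm (some (j + 1)) none)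

-- ===== PRECONDITION & SPEC =====
def Spec_extract_diff (text : String) (out : String) : Prop := out = extract_diff_alt text
instance (text : String) (out : String) : Decidable (Spec_extract_diff text out) := by unfold Spec_extract_diff; infer_instance

-- ===== CLAIM (what is proved, stated in full; the proofs are below) =====
def Claim_equal_extract_diff : Prop := ∀ (text : String), Dom_extract_diff text → Spec_extract_diff text (extract_diff text)

-- ===== LEMMAS AND PROOFS =====

-- the needle, as a char list
def ndl : List Char := "diff --git".toList

-- A's loop, characterized: the lines A keeps are the tail from the first header line on
def skipToDiff : List String → List String
  | [] => []
  | line :: rest =>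
      if PySem.Str.startswith line "diff --git" then line :: rest
      else skipToDiff rest

lemma stepA_true (acc : List String) (l : String) : stepA (acc, true) l = (acc ++ [l], true) := by
  unfold stepA
  by_cases h : PySem.Str.startswith l "diff --git" = true <;>
    · simp at h; simp [h]

lemma stepA_false (acc : List String) (l : String) :
    stepA (acc, false) l =
      if PySem.Str.startswith l "diff --git" then (acc ++ [l], true) else (acc, false) := by
  unfold stepA
  by_cases h : PySem.Str.startswith l "diff --git" = true <;>
    · simp at h; simp [h]

lemma foldA_true (ls : List String) (acc : List String) :
    ls.foldl stepA (acc, true) = (acc ++ ls, true) := by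
  induction ls generalizing acc with
  | nil => simp
  | cons l rest ih => rw [List.foldl_cons, stepA_true, ih]; simp

lemma foldA_false (ls : List String) (acc : List String) :
    ls.foldl stepA (acc, false) = (acc ++ skipToDiff ls, !(skipToDiff ls).isEmpty) := by
  induction ls generalizing acc with
  | nil => simp [skipToDiff]
  | cons l rest ih =>
      rw [List.foldl_cons, stepA_false]
      by_cases h : PySem.Str.startswith l "diff --git" = true
      · rw [if_pos h, foldA_true]
        simp at h
        simp [skipToDiff, h]
      · rw [if_neg h, ih]
        simp at h
        simp [skipToDiff, h]

-- decomposition induced by skipToDiff: a prefix of non-header lines, then the kept tail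
lemma skipToDiff_decomp (ls : List String) :
    ∃ P, ls = P ++ skipToDiff ls ∧ ∀ l ∈ P, PySem.Str.startswith l "diff --git" = false := by
  induction ls with
  | nil => exact ⟨[], by simp [skipToDiff]⟩
  | cons l rest ih =>
      by_cases h : PySem.Str.startswith l "diff --git" = true
      · refine ⟨[], ?_, by simp⟩
        rw [List.nil_append, skipToDiff, if_pos h]
      · obtain ⟨P, hP, hall⟩ := ih
        refine ⟨l :: P, ?_, ?_⟩
        · rw [skipToDiff, if_neg h, List.cons_append]
          exact congrArg (l :: ·) hP
        · intro x hx
          rcases List.mem_cons.mp hx with hx | hx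
          · subst hx; exact eq_false_of_ne_true h
          · exact hall _ hx

lemma skipToDiff_head (ls : List String) :
    ∀ s rest, skipToDiff ls = s :: rest → PySem.Str.startswith s "diff --git" = true := by
  induction ls with
  | nil => intro s rest h; simp [skipToDiff] at h
  | cons l tl ih =>
      intro s rest h
      by_cases hl : PySem.Str.startswith l "diff --git" = true
      · rw [skipToDiff, if_pos hl] at h
        exact (List.cons.injEq .. ▸ h).1 ▸ hl
      · rw [skipToDiff, if_neg hl] at h
        exact ih _ _ h

-- splitlines produces newline-free lines
lemma go_no_break (isB : Char → Bool) (s cur : List Char) (acc : List (List Char))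
    (hcur : ∀ c ∈ cur, isB c = false) (hacc : ∀ l ∈ acc, ∀ c ∈ l, isB c = false) :
    ∀ l ∈ PySem.Chars.splitlines.go isB s cur acc, ∀ c ∈ l, isB c = false := by
  fun_induction PySem.Chars.splitlines.go isB s cur acc with
  | case1 cur acc h =>
      intro l hl; simp at hl; exact hacc _ hl
  | case2 cur acc h =>
      intro l hl; simp at hl
      rcases hl with hl | hl
      · exact hacc _ hl
      · intro c hc; subst hl; exact hcur c (by simpa using hc)
  | case3 rest cur acc ih =>
      refine ih (by simp) ?_
      intro l hl; simp at hl
      rcases hl with hl | hl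
      · intro c hc; subst hl; exact hcur c (by simpa using hc)
      · exact hacc _ hl
  | case4 c rest cur acc hne hB ih =>
      refine ih (by simp) ?_
      intro l hl; simp at hl
      rcases hl with hl | hl
      · intro d hd; subst hl; exact hcur d (by simpa using hd)
      · exact hacc _ hl
  | case5 c rest cur acc hne hB ih =>
      refine ih ?_ hacc
      intro d hd; simp at hd
      rcases hd with hd | hd
      · subst hd; simpa using hB
      · exact hcur d hd

lemma splitlines_no_nl (cs : List Char) : ∀ l ∈ PySem.Chars.splitlines cs, '\n' ∉ l := by
  intro l hl hmem
  have := go_no_break _ cs [] [] (by simp) (by simp) l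
    (by simpa [PySem.Chars.splitlines] using hl) _ hmem
  simp at this

-- a newline-free prefix of "a ++ '\n' :: t" lies inside a
lemma prefix_nocross (x a t : List Char) (hx : '\n' ∉ x) (ha : '\n' ∉ a)
    (h : x <+: a ++ '\n' :: t) : x <+: a := by
  induction a generalizing x with
  | nil =>
      cases x with
      | nil => exact List.nil_prefix
      | cons c x' =>
          simp at h
          exact absurd (h.1 ▸ List.mem_cons_self) hx
  | cons b a' ih =>
      cases x with
      | nil => exact List.nil_prefix
      | cons c x' =>
          rw [List.cons_append, List.cons_prefix_cons] at h
          obtain ⟨rfl, h2⟩ := h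
          have := ih x' (fun hm => hx (List.mem_cons_of_mem _ hm))
            (fun hm => ha (List.mem_cons_of_mem _ hm)) h2
          exact List.cons_prefix_cons.mpr ⟨rfl, this⟩

-- if the needle prefixes a newline-separated join, it prefixes the first piece
lemma ndl_prefix_join (q : List Char) (M : List (List Char)) (hq : '\n' ∉ q)
    (h : ndl <+: PySem.Chars.join ['\n'] (q :: M)) : ndl <+: q := by
  cases M with
  | nil => simpa [PySem.Chars.join_singleton] using h
  | cons m M' =>
      rw [PySem.Chars.join_cons_cons] at h
      rw [List.append_assoc] at h
      exact prefix_nocross _ _ _ (by decide) hq (by simpa using h)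

-- same with extra material appended after the join
lemma ndl_prefix_join_append (q : List Char) (M : List (List Char)) (T : List Char) (hq : '\n' ∉ q)
    (h : ndl <+: PySem.Chars.join ['\n'] (q :: M) ++ '\n' :: T) : ndl <+: q := by
  cases M with
  | nil =>
      rw [PySem.Chars.join_singleton] at h
      exact prefix_nocross _ _ _ (by decide) hq h
  | cons m M' =>
      rw [PySem.Chars.join_cons_cons, List.append_assoc, List.append_assoc] at h
      exact prefix_nocross _ _ _ (by decide) hq (by simpa using h)

-- conversely, a prefix of the first piece prefixes the join
lemma ndl_prefix_join_of_head (q : List Char) (M : List (List Char))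
    (h : ndl <+: q) : ndl <+: PySem.Chars.join ['\n'] (q :: M) := by
  cases M with
  | nil => simpa [PySem.Chars.join_singleton] using h
  | cons m M' =>
      rw [PySem.Chars.join_cons_cons, List.append_assoc]
      exact h.trans (List.prefix_append _ _)

-- an occurrence of '\n'::ndl in "a ++ '\n' :: t" (a newline-free) is at the separator or inside t
lemma infix_step (a t : List Char) (ha : '\n' ∉ a)
    (h : ('\n' :: ndl) <:+: a ++ '\n' :: t) : ndl <+: t ∨ ('\n' :: ndl) <:+: t := by
  induction a with
  | nil =>
      simp only [List.nil_append] at h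
      rcases List.infix_cons_iff.mp h with h | h
      · exact Or.inl (List.cons_prefix_cons.mp h).2
      · exact Or.inr h
  | cons b a' ih =>
      rw [List.cons_append] at h
      rcases List.infix_cons_iff.mp h with h | h
      · have hb := (List.cons_prefix_cons.mp h).1
        exact absurd (List.mem_cons.mpr (Or.inl hb)) ha
      · exact ih (fun hm => ha (List.mem_cons_of_mem _ hm)) h

-- no line matches ⇒ no line-anchored occurrence anywhere in the join
lemma no_occurrence (L : List (List Char)) (hnl : ∀ l ∈ L, '\n' ∉ l)
    (hno : ∀ l ∈ L, ¬ ndl <+: l) : ¬ ('\n' :: ndl) <:+: PySem.Chars.join ['\n'] L := by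
  induction L with
  | nil =>
      rw [PySem.Chars.join_nil]
      intro h
      have := List.infix_nil.mp h
      simp at this
  | cons l M ih =>
      cases M with
      | nil =>
          rw [PySem.Chars.join_singleton]
          intro h
          exact (hnl l (by simp)) (h.subset (by simp))
      | cons m M' =>
          rw [PySem.Chars.join_cons_cons, List.append_assoc]
          intro h
          rcases infix_step l _ (hnl l (by simp)) (by simpa using h) with h | h
          · exact (hno m (by simp)) (ndl_prefix_join m M' (hnl m (by simp)) h)
          · exact ih (fun x hx => hnl x (by simp [hx])) (fun x hx => hno x (by simp [hx])) h

-- splitting a join at a list split point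
lemma join_split (P S : List (List Char)) (hP : P ≠ []) (hS : S ≠ []) :
    PySem.Chars.join ['\n'] (P ++ S) =
      PySem.Chars.join ['\n'] P ++ '\n' :: PySem.Chars.join ['\n'] S := by
  induction P with
  | nil => simp at hP
  | cons l P' ih =>
      cases P' with
      | nil =>
          cases S with
          | nil => simp at hS
          | cons s S' =>
              rw [List.singleton_append, PySem.Chars.join_cons_cons, PySem.Chars.join_singleton,
                List.append_assoc]
              rfl
      | cons p P'' =>
          have ih' := ih (by simp)
          rw [List.cons_append] at ih'
          rw [List.cons_append, List.cons_append, PySem.Chars.join_cons_cons, ih',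
            PySem.Chars.join_cons_cons]
          simp

-- no occurrence strictly before the boundary separator
lemma no_early_occurrence (P : List (List Char)) (T : List Char) (hP : P ≠ [])
    (hnl : ∀ l ∈ P, '\n' ∉ l) (hno : ∀ l ∈ P, ¬ ndl <+: l) :
    ∀ i < (PySem.Chars.join ['\n'] P).length,
      ¬ ('\n' :: ndl) <+: (PySem.Chars.join ['\n'] P ++ '\n' :: T).drop i := by
  induction P generalizing T with
  | nil => simp at hP
  | cons l P' ih =>
      cases P' with
      | nil =>
          rw [PySem.Chars.join_singleton]
          intro i hi h
          rw [List.drop_append_of_le_length (le_of_lt hi),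
            List.drop_eq_getElem_cons hi, List.cons_append, List.cons_prefix_cons] at h
          exact (hnl l (by simp)) (h.1 ▸ List.getElem_mem hi)
      | cons p P'' =>
          have hjoin : PySem.Chars.join ['\n'] (l :: p :: P'') =
              l ++ '\n' :: PySem.Chars.join ['\n'] (p :: P'') := by
            rw [PySem.Chars.join_cons_cons]; simp
          intro i hi h
          rw [hjoin] at hi h
          rw [List.append_assoc, List.cons_append] at h
          rw [List.length_append, List.length_cons] at hi
          rcases lt_trichotomy i l.length with hlt | heq | hgt
          · rw [List.drop_append_of_le_length (le_of_lt hlt),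
              List.drop_eq_getElem_cons hlt, List.cons_append, List.cons_prefix_cons] at h
            exact (hnl l (by simp)) (h.1 ▸ List.getElem_mem hlt)
          · subst heq
            rw [List.drop_append_of_le_length (le_refl _), List.drop_length,
              List.nil_append, List.cons_prefix_cons] at h
            exact (hno p (by simp))
              (ndl_prefix_join_append p P'' T (hnl p (by simp)) h.2)
          · rw [List.drop_append, List.drop_eq_nil_of_le (le_of_lt hgt), List.nil_append] at h
            have hd : i - l.length = (i - l.length - 1) + 1 := by omega
            rw [hd, List.drop_succ_cons] at h
            exact ih T (by simp) (fun x hx => hnl x (by simp [hx]))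
              (fun x hx => hno x (by simp [hx])) (i - l.length - 1) (by omega) h

-- find at the first witnessed occurrence
lemma find_first (s sub : List Char) (p : Nat) (h1 : sub <+: s.drop p)
    (h2 : ∀ i < p, ¬ sub <+: s.drop i) : PySem.Chars.find s sub = (p : Int) := by
  have hinf : sub <:+: s := h1.isInfix.trans (List.drop_suffix _ _).isInfix
  have hnn : 0 ≤ PySem.Chars.find s sub := (PySem.Chars.find_nonneg_iff s sub).mpr hinf
  obtain ⟨hp, hmin⟩ := PySem.Chars.find_spec hnn
  have : (PySem.Chars.find s sub).toNat = p := by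
    rcases lt_trichotomy (PySem.Chars.find s sub).toNat p with h | h | h
    · exact absurd hp (h2 _ h)
    · exact h
    · exact absurd h1 (hmin _ h)
  omega

-- norm's character list, after splitting the line list at the skipToDiff point
lemma norm_toList (lines : List String) :
    (PySem.Str.join "\n" lines).toList =
      PySem.Chars.join ['\n'] (lines.map String.toList) := by
  rw [PySem.Str.toList_join]
  rfl

lemma start_false_of_no_head (lines : List String)
    (hnl : ∀ l ∈ lines, '\n' ∉ l.toList)
    (hhead : ∀ s rest, lines = s :: rest → ¬ ndl <+: s.toList) :
    PySem.Str.startswith (PySem.Str.join "\n" lines) "diff --git" = false := by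
  rw [PySem.Str.startswith_eq, norm_toList]
  by_contra hc
  rw [Bool.not_eq_false] at hc
  have hpre := (PySem.Chars.startswith_iff _ _).mp (by simpa using hc)
  cases lines with
  | nil =>
      rw [List.map_nil, PySem.Chars.join_nil] at hpre
      have := List.prefix_nil.mp hpre
      simp at this
  | cons s rest =>
      rw [List.map_cons] at hpre
      exact hhead s rest rfl (ndl_prefix_join _ _ (hnl s (by simp)) hpre)

-- ===== VERDICT (by name: the statement is the Claim_ definition above) =====
theorem extract_diff_spec : Claim_equal_extract_diff := by
  intro text _
  unfold Spec_extract_diff extract_diff extract_diff_alt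
  dsimp only
  rw [foldA_false, List.nil_append]
  have hnl : ∀ l ∈ PySem.Str.splitlines text, '\n' ∉ l.toList := by
    intro l hl
    apply splitlines_no_nl text.toList
    rw [← PySem.Str.splitlines_map_toList]
    exact List.mem_map_of_mem hl
  obtain ⟨P, hdec, hfalse⟩ := skipToDiff_decomp (PySem.Str.splitlines text)
  have hfalse' : ∀ l ∈ P, ¬ ndl <+: l.toList := by
    intro l hl hp
    have := (PySem.Chars.startswith_iff l.toList ndl).mpr hp
    have h2 := hfalse l hl
    rw [PySem.Str.startswith_eq] at h2
    simp only [show ("diff --git" : String).toList = ndl from by decide] at h2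
    rw [this] at h2
    exact Bool.true_eq_false ▸ h2
  cases hS : skipToDiff (PySem.Str.splitlines text) with
  | nil =>
      rw [hS] at hdec
      rw [List.append_nil] at hdec
      have hstart : PySem.Str.startswith (PySem.Str.join "\n" (PySem.Str.splitlines text))
          "diff --git" = false := by
        apply start_false_of_no_head _ hnl
        intro q qrest hsr
        refine hfalse' q ?_
        rw [← hdec, hsr]
        exact List.mem_cons_self ..
      rw [if_neg (by rw [hstart]; decide)]
      have hfind : PySem.Str.find (PySem.Str.join "\n" (PySem.Str.splitlines text))
          "\ndiff --git" = -1 := by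
        rw [PySem.Str.find_eq, norm_toList]
        simp only [show ("\ndiff --git" : String).toList = '\n' :: ndl from by decide]
        apply (PySem.Chars.find_eq_neg_one_iff _ _).mpr
        apply no_occurrence
        · intro cl hcl
          obtain ⟨l, hl, rfl⟩ := List.mem_map.mp hcl
          exact hnl l hl
        · intro cl hcl
          obtain ⟨l, hl, rfl⟩ := List.mem_map.mp hcl
          exact hfalse' l (by rwa [← hdec])
      rw [hfind, if_pos rfl]
      show PySem.Str.strip (PySem.Str.join "\n" []) = ""
      apply String.toList_inj.mp
      rw [PySem.Str.toList_strip, norm_toList]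
      decide
  | cons s rest =>
      have hs : PySem.Str.startswith s "diff --git" = true := skipToDiff_head _ s rest hS
      have hsp : ndl <+: s.toList := by
        rw [PySem.Str.startswith_eq] at hs
        simp only [show ("diff --git" : String).toList = ndl from by decide] at hs
        exact (PySem.Chars.startswith_iff _ _).mp hs
      rw [hS] at hdec
      dsimp only
      cases hP : P with
      | nil =>
          rw [hP, List.nil_append] at hdec
          have hstart : PySem.Str.startswith (PySem.Str.join "\n" (PySem.Str.splitlines text))
              "diff --git" = true := by
            rw [PySem.Str.startswith_eq, norm_toList]
            simp only [show ("diff --git" : String).toList = ndl from by decide]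
            rw [hdec, List.map_cons]
            exact (PySem.Chars.startswith_iff _ _).mpr (ndl_prefix_join_of_head _ _ hsp)
          rw [if_pos hstart, hdec]
      | cons p P' =>
          subst hP
          have hstart : PySem.Str.startswith (PySem.Str.join "\n" (PySem.Str.splitlines text))
              "diff --git" = false := by
            apply start_false_of_no_head _ hnl
            intro q qrest hsr
            rw [hdec, List.cons_append] at hsr
            injection hsr with h1 h2
            exact h1 ▸ hfalse' p (by simp)
          rw [if_neg (by rw [hstart]; decide)]
          have hjoin : (PySem.Str.join "\n" (PySem.Str.splitlines text)).toList =
              PySem.Chars.join ['\n'] ((p :: P').map String.toList) ++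
                '\n' :: PySem.Chars.join ['\n'] ((s :: rest).map String.toList) := by
            rw [norm_toList, hdec, List.map_append]
            exact join_split _ _ (by simp) (by simp)
          have hfind : PySem.Str.find (PySem.Str.join "\n" (PySem.Str.splitlines text))
              "\ndiff --git" =
              ((PySem.Chars.join ['\n'] ((p :: P').map String.toList)).length : Int) := by
            rw [PySem.Str.find_eq]
            simp only [show ("\ndiff --git" : String).toList = '\n' :: ndl from by decide]
            rw [hjoin]
            apply find_first
            · rw [List.drop_append_of_le_length (le_refl _), List.drop_length, List.nil_append]
              rw [List.cons_prefix_cons]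
              refine ⟨rfl, ?_⟩
              rw [List.map_cons]
              exact ndl_prefix_join_of_head _ _ hsp
            · have := no_early_occurrence ((p :: P').map String.toList)
                (PySem.Chars.join ['\n'] ((s :: rest).map String.toList)) (by simp)
                (by
                  intro cl hcl
                  obtain ⟨l, hl, rfl⟩ := List.mem_map.mp hcl
                  exact hnl l (by rw [hdec]; exact List.mem_append_left _ hl))
                (by
                  intro cl hcl
                  obtain ⟨l, hl, rfl⟩ := List.mem_map.mp hcl
                  exact hfalse' l hl)
              exact this
          rw [hfind, if_neg (by omega)]
          refine congrArg PySem.Str.strip ?_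
          apply String.toList_inj.mp
          have hpos : (0 : Int) ≤
              ((PySem.Chars.join ['\n'] ((p :: P').map String.toList)).length : Int) + 1 := by
            omega
          rw [PySem.Str.toList_slice, PySem.Chars.slice_eq_listSlice,
            PySem.List.slice_from _ hpos, hjoin]
          have ht : ((((PySem.Chars.join ['\n'] ((p :: P').map String.toList)).length : Int)
              + 1).toNat) = (PySem.Chars.join ['\n'] ((p :: P').map String.toList)).length + 1 := by
            omega
          rw [ht, List.drop_append, List.drop_eq_nil_of_le (by omega), List.nil_append]
          have h1 : (PySem.Chars.join ['\n'] ((p :: P').map String.toList)).length + 1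
              - (PySem.Chars.join ['\n'] ((p :: P').map String.toList)).length = 1 := by omega
          rw [h1, norm_toList]
          rfl
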